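-- pv_equiv track=rewrite | github.com/yury-fedorov/AoC | AoC24/python/day02.py | is_safe_2
-- ===== SOURCE A (Python) =====
-- import math
-- import copy
--
-- sign = lambda x: math.copysign(1, x)
--
-- def calc_diff(level):
--     n = len(level)
--     diff = []
--     for i in range(1, n):
--         diff.append(level[i] - level[i - 1])
--     return diff
--
-- def is_safe(level) -> bool:
--     diff = calc_diff(level)
--     direction = None
--     for d in diff:
--         if not (1 <= abs(d) <= 3):
--             return False
--         direction_x = sign(d)
--         if (direction is not None) and (direction_x != direction):
--             return False
--         direction = direction_x
--
--     return True
--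
-- def is_safe_2(level) -> bool:
--     if is_safe(level):
--         return True
--     n = len(level)
--     for i in range(0, n):
--         m_level = copy.copy(level)
--         m_level.pop(i)
--         if is_safe(m_level):
--             return True
--
--     return False
-- ===== SOURCE B (Python) =====
-- def is_safe_2(level):
--     # Single scan to the first violating adjacent pair; only removing one of
--     # that pair's two elements can help.  Decreasing runs via the reversal.
--     def inc_ok(xs):
--         return all(1 <= b - a <= 3 for a, b in zip(xs, xs[1:]))
--
--     def fix_inc(xs):
--         for j, (a, b) in enumerate(zip(xs, xs[1:])):
--             if not (1 <= b - a <= 3):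
--                 return inc_ok(xs[:j] + xs[j + 1:]) or inc_ok(xs[:j + 1] + xs[j + 2:])
--         return True
--
--     return fix_inc(level) or fix_inc(level[::-1])
-- ===== Notes on version B (the rewrite author's own statement) =====
-- stated objective: faster
-- what changed: A retests the whole list for every one of the n possible removals; B scans once to the first violating adjacent pair (separately for the increasing and the reversed/decreasing direction) and tests only the two removals that can repair that pair.
import Mathlib
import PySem

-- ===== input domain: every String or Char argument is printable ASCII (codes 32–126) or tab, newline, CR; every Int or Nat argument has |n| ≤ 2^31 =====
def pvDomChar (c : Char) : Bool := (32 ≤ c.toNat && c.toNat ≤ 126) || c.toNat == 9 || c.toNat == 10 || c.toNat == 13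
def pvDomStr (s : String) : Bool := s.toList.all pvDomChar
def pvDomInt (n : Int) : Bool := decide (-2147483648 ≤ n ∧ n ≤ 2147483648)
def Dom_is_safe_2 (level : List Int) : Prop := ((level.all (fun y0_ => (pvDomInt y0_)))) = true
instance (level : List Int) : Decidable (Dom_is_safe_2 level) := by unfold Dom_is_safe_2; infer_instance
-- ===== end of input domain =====

-- B replaces A's try-every-removal O(n^2) scan by a single scan to the first
-- violating adjacent pair, testing only the two removals that can fix it
-- (decreasing sequences handled by reversing); objective: faster.

-- ===== PORT A =====
-- sign = lambda x: math.copysign(1, x)  (only ever applied to nonzero ints here;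
-- for an int argument copysign(1, x) is -1.0 iff x < 0, so this is exact)
def pySign (x : Int) : Int := if x < 0 then -1 else 1

-- calc_diff: consecutive differences (the range(1, n) loop, step for step)
def calcDiff : List Int → List Int
  | a :: b :: t => (b - a) :: calcDiff (b :: t)
  | _ => []

-- the for-loop of is_safe with its `direction` accumulator and early returns
def isSafeGo : Option Int → List Int → Bool
  | _, [] => true
  | dir, d :: ds =>
    if ¬ (1 ≤ |d| ∧ |d| ≤ 3) then false
    else
      let dx := pySign d
      match dir with
      | some dir0 => if dx ≠ dir0 then false else isSafeGo (some dx) ds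
      | none => isSafeGo (some dx) ds

def isSafeA (level : List Int) : Bool := isSafeGo none (calcDiff level)

def is_safe_2 (level : List Int) : Bool :=
  if isSafeA level then true
  else (List.range level.length).any fun i => isSafeA (level.eraseIdx i)

-- ===== PORT B =====
-- inc_ok(xs): all adjacent differences in [1, 3]
def incOk (xs : List Int) : Bool :=
  (xs.zip xs.tail).all fun p => decide (1 ≤ p.2 - p.1 ∧ p.2 - p.1 ≤ 3)

-- the `for j, (a, b) in enumerate(zip(xs, xs[1:]))` loop of fix_inc
def fixIncGo (xs : List Int) : Nat → List (Int × Int) → Bool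
  | _, [] => true
  | j, (a, b) :: rest =>
    if ¬ (1 ≤ b - a ∧ b - a ≤ 3) then
      incOk (xs.take j ++ xs.drop (j + 1)) || incOk (xs.take (j + 1) ++ xs.drop (j + 2))
    else fixIncGo xs (j + 1) rest

def fixInc (xs : List Int) : Bool := fixIncGo xs 0 (xs.zip xs.tail)

def is_safe_2_alt (level : List Int) : Bool := fixInc level || fixInc level.reverse

-- ===== PRECONDITION & SPEC =====
def Spec_is_safe_2 (level : List Int) (out : Bool) : Prop := out = is_safe_2_alt level
instance (level : List Int) (out : Bool) : Decidable (Spec_is_safe_2 level out) := by unfold Spec_is_safe_2; infer_instance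

-- ===== CLAIM (what is proved, stated in full; the proofs are below) =====
def Claim_equal_is_safe_2 : Prop := ∀ (level : List Int), Dom_is_safe_2 level → Spec_is_safe_2 level (is_safe_2 level)

-- ===== LEMMAS AND PROOFS =====

-- adjacent pair in [1,3] (the "increasing" direction)
def Ok (a b : Int) : Prop := 1 ≤ b - a ∧ b - a ≤ 3

-- all adjacent pairs increasing / decreasing, as indexed propositions
def Pp (xs : List Int) : Prop := ∀ k, (h : k + 1 < xs.length) → Ok xs[k] xs[k + 1]
def Qp (xs : List Int) : Prop := ∀ k, (h : k + 1 < xs.length) → Ok xs[k + 1] xs[k]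

lemma Pp_cons {a b : Int} {t : List Int} :
    Pp (a :: b :: t) ↔ Ok a b ∧ Pp (b :: t) := by
  constructor
  · intro h
    refine ⟨h 0 (by simp), ?_⟩
    intro k hk
    have hk2 : (k + 1) + 1 < (a :: b :: t).length := by simp at hk ⊢; omega
    simpa using h (k + 1) hk2
  · rintro ⟨h0, h⟩ k hk
    cases k with
    | zero => simpa using h0
    | succ k =>
      have hk' : k + 1 < (b :: t).length := by simp at hk ⊢; omega
      simpa using h k hk'

lemma Qp_cons {a b : Int} {t : List Int} :
    Qp (a :: b :: t) ↔ Ok b a ∧ Qp (b :: t) := by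
  constructor
  · intro h
    refine ⟨h 0 (by simp), ?_⟩
    intro k hk
    have hk2 : (k + 1) + 1 < (a :: b :: t).length := by simp at hk ⊢; omega
    simpa using h (k + 1) hk2
  · rintro ⟨h0, h⟩ k hk
    cases k with
    | zero => simpa using h0
    | succ k =>
      have hk' : k + 1 < (b :: t).length := by simp at hk ⊢; omega
      simpa using h k hk'

lemma Pp_short {xs : List Int} (h : xs.length ≤ 1) : Pp xs := by
  intro k hk; omega

lemma Qp_short {xs : List Int} (h : xs.length ≤ 1) : Qp xs := by
  intro k hk; omega

lemma incOk_iff (xs : List Int) : incOk xs = true ↔ Pp xs := by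
  induction xs with
  | nil => simpa [incOk] using Pp_short (xs := []) (by simp)
  | cons a t ih =>
    cases t with
    | nil => simpa [incOk] using Pp_short (xs := [a]) (by simp)
    | cons b t' =>
      have hcons : incOk (a :: b :: t') =
          (decide (1 ≤ b - a ∧ b - a ≤ 3) && incOk (b :: t')) := by
        simp [incOk]
      rw [hcons, Bool.and_eq_true, decide_eq_true_iff, ih, Pp_cons]
      exact Iff.rfl

-- A's is_safe equals: all diffs in [1,3] or all in [-3,-1]
lemma go_some_pos (D : List Int) :
    isSafeGo (some 1) D = true ↔ ∀ d ∈ D, 1 ≤ d ∧ d ≤ 3 := by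
  induction D with
  | nil => simp [isSafeGo]
  | cons d ds ih =>
    simp only [isSafeGo, pySign, List.forall_mem_cons]
    rcases lt_or_ge d 0 with hd | hd
    · rw [abs_of_neg hd]
      have hR : ¬ (1 ≤ d ∧ d ≤ 3) := by omega
      by_cases h1 : 1 ≤ -d ∧ -d ≤ 3
      · simp [hd, h1, hR]
      · simp [h1, hR]
    · rw [abs_of_nonneg hd]
      have hnl : ¬ d < 0 := not_lt.mpr hd
      by_cases h1 : 1 ≤ d ∧ d ≤ 3
      · simp [hnl, h1, ih]
      · simp [h1]

lemma go_some_neg (D : List Int) :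
    isSafeGo (some (-1)) D = true ↔ ∀ d ∈ D, -3 ≤ d ∧ d ≤ -1 := by
  induction D with
  | nil => simp [isSafeGo]
  | cons d ds ih =>
    simp only [isSafeGo, pySign, List.forall_mem_cons]
    rcases lt_or_ge d 0 with hd | hd
    · rw [abs_of_neg hd]
      by_cases h1 : 1 ≤ -d ∧ -d ≤ 3
      · have hR : -3 ≤ d ∧ d ≤ -1 := by omega
        simp [hd, h1, hR, ih]
      · have hR : ¬ (-3 ≤ d ∧ d ≤ -1) := by omega
        simp [h1, hR]
    · rw [abs_of_nonneg hd]
      have hnl : ¬ d < 0 := not_lt.mpr hd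
      have hR : ¬ (-3 ≤ d ∧ d ≤ -1) := by omega
      by_cases h1 : 1 ≤ d ∧ d ≤ 3
      · simp [hnl, h1, hR]
      · simp [h1, hR]

lemma go_none (D : List Int) :
    isSafeGo none D = true ↔ (∀ d ∈ D, 1 ≤ d ∧ d ≤ 3) ∨ (∀ d ∈ D, -3 ≤ d ∧ d ≤ -1) := by
  cases D with
  | nil => simp [isSafeGo]
  | cons d ds =>
    simp only [isSafeGo, pySign, List.forall_mem_cons]
    rcases lt_or_ge d 0 with hd | hd
    · rw [abs_of_neg hd]
      have hRp : ¬ (1 ≤ d ∧ d ≤ 3) := by omega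
      by_cases h1 : 1 ≤ -d ∧ -d ≤ 3
      · have hRn : -3 ≤ d ∧ d ≤ -1 := by omega
        simp [hd, h1, hRp, hRn, go_some_neg]
      · have hRn : ¬ (-3 ≤ d ∧ d ≤ -1) := by omega
        simp [h1, hRp, hRn]
    · rw [abs_of_nonneg hd]
      have hnl : ¬ d < 0 := not_lt.mpr hd
      have hRn : ¬ (-3 ≤ d ∧ d ≤ -1) := by omega
      by_cases h1 : 1 ≤ d ∧ d ≤ 3
      · simp [hnl, h1, hRn, go_some_pos]
      · simp [h1, hRn]

lemma allInc_calcDiff (xs : List Int) :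
    (∀ d ∈ calcDiff xs, 1 ≤ d ∧ d ≤ 3) ↔ Pp xs := by
  induction xs with
  | nil => simpa [calcDiff] using Pp_short (xs := []) (by simp)
  | cons a t ih =>
    cases t with
    | nil => simpa [calcDiff] using Pp_short (xs := [a]) (by simp)
    | cons b t' =>
      rw [show calcDiff (a :: b :: t') = (b - a) :: calcDiff (b :: t') from rfl,
        List.forall_mem_cons, ih, Pp_cons]
      exact Iff.rfl

lemma allDec_calcDiff (xs : List Int) :
    (∀ d ∈ calcDiff xs, -3 ≤ d ∧ d ≤ -1) ↔ Qp xs := by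
  induction xs with
  | nil => simpa [calcDiff] using Qp_short (xs := []) (by simp)
  | cons a t ih =>
    cases t with
    | nil => simpa [calcDiff] using Qp_short (xs := [a]) (by simp)
    | cons b t' =>
      rw [show calcDiff (a :: b :: t') = (b - a) :: calcDiff (b :: t') from rfl,
        List.forall_mem_cons, ih, Qp_cons]
      unfold Ok
      constructor
      · rintro ⟨h, h'⟩; exact ⟨by omega, h'⟩
      · rintro ⟨h, h'⟩; exact ⟨by omega, h'⟩

lemma isSafeA_iff (xs : List Int) : isSafeA xs = true ↔ Pp xs ∨ Qp xs := by
  rw [isSafeA, go_none, allInc_calcDiff, allDec_calcDiff]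

-- a bad pair at j survives every removal other than j or j+1
lemma bad_pair_erase {xs : List Int} {j i : Nat}
    (hj : j + 1 < xs.length) (hbad : ¬ Ok xs[j] xs[j + 1])
    (hi : i < xs.length) (hij : i ≠ j) (hij1 : i ≠ j + 1) :
    ¬ Pp (xs.eraseIdx i) := by
  intro hP
  have hlen : (xs.eraseIdx i).length = xs.length - 1 := by
    rw [List.length_eraseIdx]; simp [hi]
  rcases Nat.lt_or_ge i j with hlt | hge
  · -- i < j : the bad pair sits at positions j-1, j of the erased list
    have hj1 : j - 1 + 1 < (xs.eraseIdx i).length := by omega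
    have h := hP (j - 1) hj1
    have e1 : (xs.eraseIdx i)[j - 1]'(by omega) = xs[j]'(by omega) := by
      rw [List.getElem_eraseIdx_of_ge _ (by omega)]
      simp only [show j - 1 + 1 = j from by omega]
    have e2 : (xs.eraseIdx i)[j - 1 + 1]'hj1 = xs[j + 1]'hj := by
      rw [List.getElem_eraseIdx_of_ge _ (by omega)]
      simp only [show j - 1 + 1 + 1 = j + 1 from by omega]
    rw [e1, e2] at h
    exact hbad h
  · -- i > j + 1 : the bad pair is untouched
    have hgt : j + 1 < i := by omega
    have hj1 : j + 1 < (xs.eraseIdx i).length := by omega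
    have h := hP j hj1
    have e1 : (xs.eraseIdx i)[j]'(by omega) = xs[j]'(by omega) :=
      List.getElem_eraseIdx_of_lt _ (by omega)
    have e2 : (xs.eraseIdx i)[j + 1]'hj1 = xs[j + 1]'hj :=
      List.getElem_eraseIdx_of_lt _ (by omega)
    rw [e1, e2] at h
    exact hbad h

lemma fixIncGo_iff (xs : List Int) : ∀ (t : List (Int × Int)) (j : Nat),
    t = (xs.drop j).zip (xs.drop (j + 1)) →
    (∀ k, k < j → (h : k + 1 < xs.length) → Ok xs[k] xs[k + 1]) →
    (fixIncGo xs j t = true ↔ Pp xs ∨ ∃ i < xs.length, Pp (xs.eraseIdx i)) := by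
  intro t
  induction t with
  | nil =>
    intro j ht hpre
    have hlen : xs.length ≤ j + 1 := by
      rcases List.zip_eq_nil_iff.mp ht.symm with h | h
      · have := List.drop_eq_nil_iff.mp h; omega
      · exact List.drop_eq_nil_iff.mp h
    have hP : Pp xs := fun k hk => hpre k (by omega) hk
    simp [fixIncGo, hP]
  | cons p rest ih =>
    obtain ⟨a, b⟩ := p
    intro j ht hpre
    have hj1 : j + 1 < xs.length := by
      by_contra h
      have hd : xs.drop (j + 1) = [] := List.drop_eq_nil_iff.mpr (by omega)
      rw [hd, List.zip_nil_right] at ht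
      exact List.cons_ne_nil _ _ ht
    have hdj : xs.drop j = xs[j]'(by omega) :: xs.drop (j + 1) :=
      List.drop_eq_getElem_cons (by omega)
    have hdj1 : xs.drop (j + 1) = xs[j + 1]'hj1 :: xs.drop (j + 2) :=
      List.drop_eq_getElem_cons hj1
    rw [hdj, hdj1, List.zip_cons_cons] at ht
    simp only [List.cons.injEq, Prod.mk.injEq] at ht
    obtain ⟨⟨ha, hb⟩, hrest⟩ := ht
    have ht' : rest = (xs.drop (j + 1)).zip (xs.drop (j + 1 + 1)) := by
      rw [hdj1]; exact hrest
    simp only [fixIncGo]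
    by_cases hok : 1 ≤ b - a ∧ b - a ≤ 3
    · rw [if_neg (not_not_intro hok)]
      refine ih (j + 1) ht' ?_
      intro k hk hklen
      rcases Nat.lt_or_ge k j with hlt | hge
      · exact hpre k hlt hklen
      · have : k = j := by omega
        subst this
        rw [ha, hb] at hok
        exact hok
    · rw [if_pos hok]
      have e2 : xs.take (j + 1) ++ xs.drop (j + 2) = xs.eraseIdx (j + 1) :=
        (List.eraseIdx_eq_take_drop_succ xs (j + 1)).symm
      rw [← List.eraseIdx_eq_take_drop_succ xs j, e2, Bool.or_eq_true,
        incOk_iff, incOk_iff]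
      have hbad : ¬ Ok (xs[j]'(by omega)) (xs[j + 1]'hj1) := by
        rw [← ha, ← hb]; exact hok
      constructor
      · rintro (h | h)
        · exact Or.inr ⟨j, by omega, h⟩
        · exact Or.inr ⟨j + 1, by omega, h⟩
      · rintro (hP | ⟨i, hi, hPe⟩)
        · exact absurd (hP j hj1) hbad
        · by_cases hij : i = j
          · subst hij; exact Or.inl hPe
          · by_cases hij1 : i = j + 1
            · subst hij1; exact Or.inr hPe
            · exact absurd hPe (bad_pair_erase hj1 hbad hi hij hij1)

lemma fixInc_iff (xs : List Int) :
    fixInc xs = true ↔ Pp xs ∨ ∃ i < xs.length, Pp (xs.eraseIdx i) := by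
  exact fixIncGo_iff xs (xs.zip xs.tail) 0
    (by rw [List.drop_zero, List.drop_one])
    (fun k hk _ => absurd hk (Nat.not_lt_zero k))

lemma Pp_reverse (xs : List Int) : Pp xs.reverse ↔ Qp xs := by
  constructor
  · intro h k hk
    have hm : (xs.length - 2 - k) + 1 < xs.reverse.length := by simp; omega
    have := h (xs.length - 2 - k) hm
    rw [List.getElem_reverse, List.getElem_reverse] at this
    simp only [show xs.length - 1 - (xs.length - 2 - k) = k + 1 from by omega,
      show xs.length - 1 - (xs.length - 2 - k + 1) = k from by omega] at this
    exact this
  · intro h k hk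
    have hk' : k + 1 < xs.length := by simpa using hk
    rw [List.getElem_reverse, List.getElem_reverse]
    simp only [show xs.length - 1 - k = (xs.length - 2 - k) + 1 from by omega,
      show xs.length - 1 - (k + 1) = xs.length - 2 - k from by omega]
    exact h (xs.length - 2 - k) (by omega)

lemma eraseIdx_reverse' (xs : List Int) (i : Nat) (hi : i < xs.length) :
    xs.reverse.eraseIdx i = (xs.eraseIdx (xs.length - 1 - i)).reverse := by
  rw [List.eraseIdx_eq_take_drop_succ, List.take_reverse, List.drop_reverse,
    List.eraseIdx_eq_take_drop_succ, List.reverse_append]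
  simp only [show xs.length - (i + 1) = xs.length - 1 - i from by omega,
    show xs.length - 1 - i + 1 = xs.length - i from by omega]

lemma fixInc_reverse_iff (xs : List Int) :
    fixInc xs.reverse = true ↔ Qp xs ∨ ∃ i < xs.length, Qp (xs.eraseIdx i) := by
  rw [fixInc_iff, Pp_reverse, List.length_reverse]
  constructor
  · rintro (h | ⟨i, hi, h⟩)
    · exact Or.inl h
    · right
      refine ⟨xs.length - 1 - i, by omega, ?_⟩
      rw [eraseIdx_reverse' xs i hi] at h
      exact (Pp_reverse _).mp h
  · rintro (h | ⟨i, hi, h⟩)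
    · exact Or.inl h
    · right
      refine ⟨xs.length - 1 - i, by omega, ?_⟩
      rw [eraseIdx_reverse' xs (xs.length - 1 - i) (by omega), Pp_reverse]
      simp only [show xs.length - 1 - (xs.length - 1 - i) = i from by omega]
      exact h

-- ===== VERDICT (by name: the statement is the Claim_ definition above) =====
theorem is_safe_2_spec : Claim_equal_is_safe_2 := by
  intro level _
  unfold Spec_is_safe_2
  rw [Bool.eq_iff_iff]
  unfold is_safe_2 is_safe_2_alt
  rw [Bool.or_eq_true, fixInc_iff, fixInc_reverse_iff]
  constructor
  · intro h
    split at h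
    · rename_i hs
      rcases (isSafeA_iff level).mp hs with hp | hq
      · exact Or.inl (Or.inl hp)
      · exact Or.inr (Or.inl hq)
    · rcases List.any_eq_true.mp h with ⟨i, hi, hsi⟩
      rw [List.mem_range] at hi
      rcases (isSafeA_iff _).mp hsi with hp | hq
      · exact Or.inl (Or.inr ⟨i, hi, hp⟩)
      · exact Or.inr (Or.inr ⟨i, hi, hq⟩)
  · intro h
    by_cases hs : isSafeA level = true
    · simp [hs]
    · simp only [if_neg hs]
      have : ∃ i < level.length, Pp (level.eraseIdx i) ∨ Qp (level.eraseIdx i) := by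
        rcases h with (hp | ⟨i, hi, hp⟩) | (hq | ⟨i, hi, hq⟩)
        · exact absurd ((isSafeA_iff level).mpr (Or.inl hp)) hs
        · exact ⟨i, hi, Or.inl hp⟩
        · exact absurd ((isSafeA_iff level).mpr (Or.inr hq)) hs
        · exact ⟨i, hi, Or.inr hq⟩
      rcases this with ⟨i, hi, hio⟩
      exact List.any_eq_true.mpr ⟨i, List.mem_range.mpr hi, (isSafeA_iff _).mpr hio⟩
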